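-- pv_equiv track=rewrite | github.com/dallonasnes/spoonfed-commonvoice | main.py | _remove_dup_sentences
-- ===== SOURCE A (Python) =====
-- from collections import OrderedDict
--
-- def _remove_dup_sentences(ordered_map):
--     """Remove any sentences that don't introduce new words"""
--     deduped_ordered_map = OrderedDict()
--     previously_seen_words = set()
--     for key, sentence in ordered_map.items():
--         has_unseen_words = False
--         for word in sentence.split():
--             if word not in previously_seen_words:
--                 has_unseen_words = True
--                 previously_seen_words.add(word)
--         if has_unseen_words:
--             deduped_ordered_map[key] = sentence
--     return deduped_ordered_map
-- ===== SOURCE B (Python) =====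
-- from collections import OrderedDict
--
-- def _remove_dup_sentences(ordered_map):
--     """Remove any sentences that don't introduce new words"""
--     first_occurrence = {}
--     for key, sentence in ordered_map.items():
--         for word in sentence.split():
--             first_occurrence.setdefault(word, key)
--     introducing_keys = set(first_occurrence.values())
--     return OrderedDict(
--         (key, sentence)
--         for key, sentence in ordered_map.items()
--         if key in introducing_keys
--     )
-- ===== Notes on version B (the rewrite author's own statement) =====
-- stated objective: alternative
-- what changed: Instead of A's single stateful scan that tracks a growing seen-word set and keeps a sentence when its inner word loop finds an unseen word, B first builds a word -> earliest-sentence-key index with dict.setdefault, collects the set of keys that are the first occurrence of some word, and then filters the map in a second pass by membership in that key set.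
import Mathlib
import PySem

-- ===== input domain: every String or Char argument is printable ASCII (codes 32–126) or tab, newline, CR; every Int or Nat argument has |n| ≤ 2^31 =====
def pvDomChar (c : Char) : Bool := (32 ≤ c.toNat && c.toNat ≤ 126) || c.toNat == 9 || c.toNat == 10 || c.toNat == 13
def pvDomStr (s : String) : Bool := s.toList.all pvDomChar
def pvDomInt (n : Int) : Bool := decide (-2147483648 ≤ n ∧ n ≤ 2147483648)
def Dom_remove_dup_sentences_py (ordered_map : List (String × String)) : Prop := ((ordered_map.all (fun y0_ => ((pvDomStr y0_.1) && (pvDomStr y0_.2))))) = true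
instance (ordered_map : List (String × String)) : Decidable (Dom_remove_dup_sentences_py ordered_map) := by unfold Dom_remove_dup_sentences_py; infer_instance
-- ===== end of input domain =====

-- B reframes "this sentence introduces a new word" as "this sentence is the first occurrence of
-- some word": one indexing pass builds word -> earliest key, then a filter pass keeps exactly the
-- keys that appear as a first-occurrence value (objective: alternative decomposition, same cost).


-- ===== PORT A =====
def remove_dup_sentences_py (ordered_map : List (String × String)) : List (String × String) :=
  (ordered_map.foldl
    (fun (st : PySem.Dict String String × PySem.Set String) p =>
      -- inner loop: for word in sentence.split(): if word not in previously_seen_words: …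
      let inner := (PySem.Str.split₀ p.2).foldl
        (fun (st2 : Bool × PySem.Set String) w =>
          if PySem.Set.contains st2.2 w then st2 else (true, PySem.Set.add st2.2 w))
        (false, st.2)
      if inner.1 then (st.1.insert p.1 p.2, inner.2) else (st.1, inner.2))
    (PySem.Dict.empty, PySem.Set.empty)).1.items

-- ===== PORT B =====
def remove_dup_sentences_py_alt (ordered_map : List (String × String)) : List (String × String) :=
  let first_occurrence : PySem.Dict String String :=
    ordered_map.foldl
      (fun d p => (PySem.Str.split₀ p.2).foldl (fun d w => PySem.Dict.setdefault d w p.1) d)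
      PySem.Dict.empty
  let introducing_keys : PySem.Set String :=
    PySem.Set.ofList (PySem.Dict.values first_occurrence)
  ordered_map.filter (fun p => PySem.Set.contains introducing_keys p.1)

-- ===== PRECONDITION & SPEC =====
-- Pre_ excludes association lists with duplicate keys: A's parameter is a Python dict (OrderedDict),
-- which cannot hold duplicate keys, so such lists correspond to no input A is ever called on.
def Pre_remove_dup_sentences_py (ordered_map : List (String × String)) : Prop :=
  (ordered_map.map Prod.fst).Nodup
instance (ordered_map : List (String × String)) : Decidable (Pre_remove_dup_sentences_py ordered_map) := by unfold Pre_remove_dup_sentences_py; infer_instance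

def pvWitness_remove_dup_sentences_py : (List (String × String)) :=
  [("k1", "hello world"), ("k2", "hello"), ("k3", "new world")]

def Spec_remove_dup_sentences_py (ordered_map : List (String × String)) (out : List (String × String)) : Prop := out = remove_dup_sentences_py_alt ordered_map
instance (ordered_map : List (String × String)) (out : List (String × String)) : Decidable (Spec_remove_dup_sentences_py ordered_map out) := by unfold Spec_remove_dup_sentences_py; infer_instance

-- ===== CLAIM (what is proved, stated in full; the proofs are below) =====
def Claim_equal_remove_dup_sentences_py : Prop := ∀ (ordered_map : List (String × String)), Dom_remove_dup_sentences_py ordered_map → Pre_remove_dup_sentences_py ordered_map → Spec_remove_dup_sentences_py ordered_map (remove_dup_sentences_py ordered_map)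

-- ===== LEMMAS AND PROOFS =====

-- Common specification both ports are reduced to: keep a pair iff its sentence has a word
-- outside the words seen so far, accumulating the seen words.
def pvKeep : List (String × String) → List String → List (String × String)
  | [], _ => []
  | p :: t, seen =>
    if (PySem.Str.split₀ p.2).any (fun w => !PySem.Set.contains seen w)
    then p :: pvKeep t (seen ++ PySem.Str.split₀ p.2)
    else pvKeep t (seen ++ PySem.Str.split₀ p.2)

theorem pvKeep_congr (l : List (String × String)) (s1 s2 : List String)
    (h : ∀ w, w ∈ s1 ↔ w ∈ s2) : pvKeep l s1 = pvKeep l s2 := by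
  induction l generalizing s1 s2 with
  | nil => rfl
  | cons p t ih =>
    have hany : ((PySem.Str.split₀ p.2).any fun w => !PySem.Set.contains s1 w)
        = ((PySem.Str.split₀ p.2).any fun w => !PySem.Set.contains s2 w) := by
      apply PySem.List.any_congr_mem
      intro w _
      simp [h w]
    have ht : pvKeep t (s1 ++ PySem.Str.split₀ p.2) = pvKeep t (s2 ++ PySem.Str.split₀ p.2) := by
      apply ih; intro w; simp [h w]
    simp only [pvKeep, hany, ht]

-- A's inner loop over the words of one sentence.
theorem pvInner_eq (ws : List String) (seen : PySem.Set String) (b : Bool) :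
    ws.foldl (fun (st2 : Bool × PySem.Set String) w =>
        if PySem.Set.contains st2.2 w then st2 else (true, PySem.Set.add st2.2 w)) (b, seen)
      = (b || ws.any (fun w => !PySem.Set.contains seen w), PySem.Set.update seen ws) := by
  induction ws generalizing seen b with
  | nil => simp [PySem.Set.update_nil]
  | cons w t ih =>
    have hstep : (w :: t).foldl (fun (st2 : Bool × PySem.Set String) w =>
        if PySem.Set.contains st2.2 w then st2 else (true, PySem.Set.add st2.2 w)) (b, seen)
        = t.foldl (fun (st2 : Bool × PySem.Set String) w =>
            if PySem.Set.contains st2.2 w then st2 else (true, PySem.Set.add st2.2 w))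
            (if PySem.Set.contains seen w then (b, seen) else (true, PySem.Set.add seen w)) := rfl
    rw [hstep]
    by_cases h : w ∈ seen
    · have hc : PySem.Set.contains seen w = true := by simp [h]
      rw [if_pos hc, ih]
      simp [h, PySem.Set.update_cons]
    · have hc : PySem.Set.contains seen w = false := by simp [h]
      rw [if_neg (by rw [hc]; simp), ih]
      simp [h, PySem.Set.update_cons]

theorem pvA_fold (l : List (String × String)) (d : PySem.Dict String String) (seen : PySem.Set String)
    (hnd : (l.map Prod.fst).Nodup) (hdis : ∀ p ∈ l, d.contains p.1 = false) :
    (l.foldl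
      (fun (st : PySem.Dict String String × PySem.Set String) p =>
        let inner := (PySem.Str.split₀ p.2).foldl
          (fun (st2 : Bool × PySem.Set String) w =>
            if PySem.Set.contains st2.2 w then st2 else (true, PySem.Set.add st2.2 w))
          (false, st.2)
        if inner.1 then (st.1.insert p.1 p.2, inner.2) else (st.1, inner.2))
      (d, seen)).1.items = d.items ++ pvKeep l seen := by
  induction l generalizing d seen with
  | nil => simp [pvKeep]
  | cons p t ih =>
    rw [List.map_cons] at hnd
    have hpt : p.1 ∉ t.map Prod.fst := (List.nodup_cons.mp hnd).1
    have hnd' : (t.map Prod.fst).Nodup := (List.nodup_cons.mp hnd).2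
    have hpd : d.contains p.1 = false := hdis p (List.mem_cons_self ..)
    have hdis' : ∀ q ∈ t, (d.insert p.1 p.2).contains q.1 = false := by
      intro q hq
      have h1 : q.1 ≠ p.1 := fun he => hpt (he ▸ List.mem_map_of_mem hq)
      rw [PySem.Dict.contains_insert]
      simp [h1, hdis q (List.mem_cons_of_mem _ hq)]
    have hcong : pvKeep t (PySem.Set.update seen (PySem.Str.split₀ p.2))
        = pvKeep t (seen ++ PySem.Str.split₀ p.2) :=
      pvKeep_congr _ _ _ (fun w => by simp [PySem.Set.mem_update])
    have hdisT : ∀ q ∈ t, d.contains q.1 = false :=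
      fun q hq => hdis q (List.mem_cons_of_mem _ hq)
    have ih1 := ih (d.insert p.1 p.2) (PySem.Set.update seen (PySem.Str.split₀ p.2)) hnd' hdis'
    have ih2 := ih d (PySem.Set.update seen (PySem.Str.split₀ p.2)) hnd' hdisT
    simp only [pvInner_eq, Bool.false_or] at ih1 ih2
    simp only [List.foldl_cons, pvInner_eq, Bool.false_or]
    have hk2 : pvKeep (p :: t) seen =
        if ((PySem.Str.split₀ p.2).any fun w => !PySem.Set.contains seen w) = true
        then p :: pvKeep t (seen ++ PySem.Str.split₀ p.2)
        else pvKeep t (seen ++ PySem.Str.split₀ p.2) := rfl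
    by_cases hb : ((PySem.Str.split₀ p.2).any fun w => !PySem.Set.contains seen w) = true
    · rw [if_pos hb, ih1, PySem.Dict.items_insert_of_not_contains d p.2 hpd, hcong,
        hk2, if_pos hb]
      simp
    · rw [if_neg hb, ih2, hcong, hk2, if_neg hb]

-- B's setdefault pass, one sentence.
def pvSD (d : PySem.Dict String String) (ws : List String) (k : String) : PySem.Dict String String :=
  ws.foldl (fun d w => PySem.Dict.setdefault d w k) d

def pvF (d : PySem.Dict String String) (l : List (String × String)) : PySem.Dict String String :=
  l.foldl (fun d p => (PySem.Str.split₀ p.2).foldl (fun d w => PySem.Dict.setdefault d w p.1) d) d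

theorem pvSD_keys (ws : List String) (d : PySem.Dict String String) (k w' : String) :
    w' ∈ (pvSD d ws k).keys ↔ w' ∈ d.keys ∨ w' ∈ ws := by
  induction ws generalizing d with
  | nil => simp [pvSD]
  | cons w t ih =>
    have hstep : pvSD d (w :: t) k = pvSD (d.setdefault w k) t k := rfl
    rw [hstep]
    by_cases hc : d.contains w = true
    · have hw : w ∈ d.keys := (PySem.Dict.contains_iff_mem_keys d w).mp hc
      rw [PySem.Dict.setdefault_of_contains d k hc, ih]
      constructor
      · rintro (h | h) <;> simp [h]
      · rintro (h | h)
        · exact Or.inl h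
        · rcases List.mem_cons.mp h with he | h
          · exact Or.inl (he ▸ hw)
          · exact Or.inr h
    · have hc' : d.contains w = false := by simpa using hc
      rw [PySem.Dict.setdefault_of_not_contains d k hc', ih]
      simp only [PySem.Dict.mem_keys_insert, List.mem_cons]
      tauto

theorem pvSD_values (ws : List String) (d : PySem.Dict String String) (k v : String) :
    v ∈ (pvSD d ws k).values ↔ v ∈ d.values ∨ (v = k ∧ ∃ w ∈ ws, w ∉ d.keys) := by
  induction ws generalizing d with
  | nil => simp [pvSD]
  | cons w t ih =>
    have hstep : pvSD d (w :: t) k = pvSD (d.setdefault w k) t k := rfl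
    rw [hstep]
    by_cases hc : d.contains w = true
    · have hw : w ∈ d.keys := (PySem.Dict.contains_iff_mem_keys d w).mp hc
      rw [PySem.Dict.setdefault_of_contains d k hc, ih]
      constructor
      · rintro (h | ⟨he, w', hw', hk⟩)
        · exact Or.inl h
        · exact Or.inr ⟨he, w', List.mem_cons_of_mem _ hw', hk⟩
      · rintro (h | ⟨he, w', hw', hk⟩)
        · exact Or.inl h
        · rcases List.mem_cons.mp hw' with he' | hw''
          · exact absurd (he' ▸ hw) hk
          · exact Or.inr ⟨he, w', hw'', hk⟩
    · have hc' : d.contains w = false := by simpa using hc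
      have hw : w ∉ d.keys := fun h => by
        simp [(PySem.Dict.contains_iff_mem_keys d w).mpr h] at hc'
      have hv : (d.insert w k).values = d.values ++ [k] := by
        simp [PySem.Dict.values, PySem.Dict.items_insert_of_not_contains d k hc']
      have hk : (d.insert w k).keys = d.keys ++ [w] := by
        simp [PySem.Dict.keys, PySem.Dict.items_insert_of_not_contains d k hc']
      rw [PySem.Dict.setdefault_of_not_contains d k hc', ih, hv, hk]
      constructor
      · rintro (h | ⟨he, w', hw', hnk⟩)
        · rcases List.mem_append.mp h with h | h
          · exact Or.inl h
          · exact Or.inr ⟨List.mem_singleton.mp h, w, List.mem_cons_self, hw⟩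
        · refine Or.inr ⟨he, w', List.mem_cons_of_mem _ hw', fun hm => hnk ?_⟩
          exact List.mem_append.mpr (Or.inl hm)
      · rintro (h | ⟨he, w', hw', hnk⟩)
        · exact Or.inl (List.mem_append.mpr (Or.inl h))
        · exact Or.inl (List.mem_append.mpr (Or.inr (List.mem_singleton.mpr he)))

theorem pvF_values_mono (l : List (String × String)) (d : PySem.Dict String String) (v : String)
    (h : v ∈ d.values) : v ∈ (pvF d l).values := by
  induction l generalizing d with
  | nil => exact h
  | cons p t ih =>
    have hstep : pvF d (p :: t) = pvF (pvSD d (PySem.Str.split₀ p.2) p.1) t := rfl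
    rw [hstep]
    exact ih _ ((pvSD_values _ _ _ _).mpr (Or.inl h))

theorem pvF_values_src (l : List (String × String)) (d : PySem.Dict String String) (v : String)
    (h : v ∈ (pvF d l).values) : v ∈ d.values ∨ ∃ p ∈ l, v = p.1 := by
  induction l generalizing d with
  | nil => exact Or.inl h
  | cons p t ih =>
    have hstep : pvF d (p :: t) = pvF (pvSD d (PySem.Str.split₀ p.2) p.1) t := rfl
    rw [hstep] at h
    rcases ih _ h with h1 | ⟨q, hq, he⟩
    · rcases (pvSD_values _ _ _ _).mp h1 with h2 | ⟨he, _⟩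
      · exact Or.inl h2
      · exact Or.inr ⟨p, List.mem_cons_self .., he⟩
    · exact Or.inr ⟨q, List.mem_cons_of_mem _ hq, he⟩

theorem pvB_main (l : List (String × String)) (d : PySem.Dict String String)
    (hnd : (l.map Prod.fst).Nodup) (hvals : ∀ p ∈ l, p.1 ∉ d.values) :
    l.filter (fun p => decide (p.1 ∈ (pvF d l).values)) = pvKeep l d.keys := by
  induction l generalizing d with
  | nil => rfl
  | cons p t ih =>
    rw [List.map_cons] at hnd
    have hpt : p.1 ∉ t.map Prod.fst := (List.nodup_cons.mp hnd).1
    have hnd' : (t.map Prod.fst).Nodup := (List.nodup_cons.mp hnd).2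
    have hstep : pvF d (p :: t) = pvF (pvSD d (PySem.Str.split₀ p.2) p.1) t := rfl
    have hvals' : ∀ q ∈ t, q.1 ∉ (pvSD d (PySem.Str.split₀ p.2) p.1).values := by
      intro q hq hmem
      rcases (pvSD_values _ _ _ _).mp hmem with h1 | ⟨he, _⟩
      · exact hvals q (List.mem_cons_of_mem _ hq) h1
      · exact hpt (he ▸ List.mem_map_of_mem hq)
    have hhead : (p.1 ∈ (pvF (pvSD d (PySem.Str.split₀ p.2) p.1) t).values)
        ↔ ∃ w ∈ PySem.Str.split₀ p.2, w ∉ d.keys := by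
      constructor
      · intro h
        rcases pvF_values_src _ _ _ h with h1 | ⟨q, hq, he⟩
        · rcases (pvSD_values _ _ _ _).mp h1 with h2 | ⟨_, hw⟩
          · exact absurd h2 (hvals p (List.mem_cons_self ..))
          · exact hw
        · exact absurd (he ▸ List.mem_map_of_mem hq) hpt
      · intro hw
        exact pvF_values_mono _ _ _ ((pvSD_values _ _ _ _).mpr (Or.inr ⟨rfl, hw⟩))
    have hany : (((PySem.Str.split₀ p.2).any fun w => !PySem.Set.contains d.keys w) = true)
        ↔ ∃ w ∈ PySem.Str.split₀ p.2, w ∉ d.keys := by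
      simp
    have hcong : pvKeep t (pvSD d (PySem.Str.split₀ p.2) p.1).keys
        = pvKeep t (d.keys ++ PySem.Str.split₀ p.2) :=
      pvKeep_congr _ _ _ (fun w => by rw [pvSD_keys]; simp)
    rw [List.filter_cons]
    have hk2 : pvKeep (p :: t) d.keys =
        if ((PySem.Str.split₀ p.2).any fun w => !PySem.Set.contains d.keys w) = true
        then p :: pvKeep t (d.keys ++ PySem.Str.split₀ p.2)
        else pvKeep t (d.keys ++ PySem.Str.split₀ p.2) := rfl
    have h2 : t.filter (fun q => decide (q.1 ∈ (pvF d (p :: t)).values))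
        = pvKeep t (pvSD d (PySem.Str.split₀ p.2) p.1).keys := by
      rw [hstep]; exact ih _ hnd' hvals'
    by_cases hb : ∃ w ∈ PySem.Str.split₀ p.2, w ∉ d.keys
    · have h1 : decide (p.1 ∈ (pvF d (p :: t)).values) = true := by
        rw [hstep]; simp [hhead.mpr hb]
      rw [h1, if_pos rfl, h2, hcong, hk2, if_pos (hany.mpr hb)]
    · have h1 : decide (p.1 ∈ (pvF d (p :: t)).values) = false := by
        rw [hstep]; simp [hb, hhead]
      rw [h1, if_neg (by simp), h2, hcong, hk2, if_neg (fun hx => hb (hany.mp hx))]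

theorem pvA_eq (l : List (String × String)) (hnd : (l.map Prod.fst).Nodup) :
    remove_dup_sentences_py l = pvKeep l [] := by
  unfold remove_dup_sentences_py
  rw [pvA_fold l PySem.Dict.empty PySem.Set.empty hnd (fun p _ => by simp [pysem])]
  rfl

theorem pvB_eq (l : List (String × String)) (hnd : (l.map Prod.fst).Nodup) :
    remove_dup_sentences_py_alt l = pvKeep l [] := by
  show l.filter (fun p => PySem.Set.contains
      (PySem.Set.ofList (PySem.Dict.values (pvF PySem.Dict.empty l))) p.1) = pvKeep l []
  rw [List.filter_congr (fun p _ => by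
    simp [PySem.Set.mem_ofList] :
    ∀ p ∈ l, PySem.Set.contains (PySem.Set.ofList (PySem.Dict.values (pvF PySem.Dict.empty l))) p.1
      = decide (p.1 ∈ (pvF PySem.Dict.empty l).values))]
  rw [pvB_main l PySem.Dict.empty hnd (fun p _ h => by
    have he : (PySem.Dict.empty : PySem.Dict String String).values = [] := rfl
    rw [he] at h; cases h)]
  rfl

-- ===== VERDICT (by name: the statement is the Claim_ definition above) =====
theorem remove_dup_sentences_py_spec : Claim_equal_remove_dup_sentences_py := by
  intro l _ hpre
  unfold Spec_remove_dup_sentences_py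
  rw [pvA_eq l hpre, pvB_eq l hpre]
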